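-- pv_equiv track=rewrite | github.com/kklee0930/Algorithm | 프로그래머스/unrated/134240. 푸드 파이트 대회/푸드 파이트 대회.py | solution
-- ===== SOURCE A (Python) =====
-- def solution(food):
--     answer = ['0']
--
--     for i in range(len(food)-1, 0, -1): # food리스트 역순으로
--         amount = food[i] // 2 # 두명의 선수이므로 2의 몫
--         if amount == 0: # 몫이 0이면 대회에 제공불가능
--             continue
--         food_amount = str(i) * amount # 음식 번호 * 수량
--         answer.append(str(food_amount)) # 각 선수의 위치대로 제공
--         answer.insert(0, str(food_amount))
--
--     answer = ''.join(answer)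
--     return answer
-- ===== SOURCE B (Python) =====
-- def solution(food):
--     def halves(lo, hi):
--         # (left, right): tokens of indices [lo, hi) joined forward, and joined backward
--         if hi - lo == 1:
--             t = str(lo) * (food[lo] // 2)
--             return t, t
--         mid = (lo + hi) // 2
--         l1, r1 = halves(lo, mid)
--         l2, r2 = halves(mid, hi)
--         return l1 + l2, r2 + r1
--     if len(food) < 2:
--         return '0'
--     l, r = halves(1, len(food))
--     return l + '0' + r
-- ===== Notes on version B (the rewrite author's own statement) =====
-- stated objective: alternative
-- what changed: B builds the palindrome by divide and conquer: halves(lo,hi) recursively returns the forward and backward joins of the tokens for indices [lo,hi), merging halves as (l1+l2, r2+r1), and the answer is left + '0' + right, instead of A's reverse loop that maintains a growing list and inserts each token at both its front and back before joining.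
import Mathlib
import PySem

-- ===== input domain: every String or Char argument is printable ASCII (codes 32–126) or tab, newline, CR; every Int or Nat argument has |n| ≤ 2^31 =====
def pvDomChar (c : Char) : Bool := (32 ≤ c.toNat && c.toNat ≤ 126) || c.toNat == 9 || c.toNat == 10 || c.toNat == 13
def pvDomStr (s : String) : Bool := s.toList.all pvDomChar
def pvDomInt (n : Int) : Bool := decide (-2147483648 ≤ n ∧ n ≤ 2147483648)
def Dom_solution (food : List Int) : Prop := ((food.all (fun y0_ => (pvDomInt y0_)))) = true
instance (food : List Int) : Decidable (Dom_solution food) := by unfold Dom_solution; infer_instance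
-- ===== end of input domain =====

-- B builds the palindrome by divide and conquer (halves(lo,hi) returns the forward and backward
-- joins of the tokens of [lo,hi), merged as (l1+l2, r2+r1)), instead of A's reverse loop inserting
-- each token at front and back of a growing list (objective: alternative).


-- ===== PORT A =====
-- str(i) * (food[i] // 2) on List Char: the token contributed by food index i.
-- food[i] is ported as pyGetD food i 0: every index either program reads satisfies
-- 1 ≤ i < len(food), so the default 0 is never used and the access is exact.
def pvTok (food : List Int) (i : Int) : List Char :=
  PySem.List.pyRepeat (PySem.Int.toChars i) (PySem.Int.floordiv (PySem.List.pyGetD food i 0) 2)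

def solution (food : List Int) : String :=
  let answer : List (List Char) :=
    (PySem.List.pyRange ((food.length : Int) - 1) 0 (-1)).foldl
      (fun acc i =>
        let amount := PySem.Int.floordiv (PySem.List.pyGetD food i 0) 2
        if amount = 0 then acc
        else
          let food_amount := PySem.List.pyRepeat (PySem.Int.toChars i) amount
          food_amount :: (acc ++ [food_amount]))
      [['0']]
  String.ofList (PySem.Chars.join [] answer)

-- ===== PORT B =====
-- halves(lo, hi): forward and backward joins of the tokens of indices [lo, hi);
-- the `hi ≤ lo` guard only makes the recursion total — Python B never calls it there.
def pvHalves (food : List Int) (lo hi : Nat) : List Char × List Char :=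
  if hi - lo = 1 then
    let t := pvTok food (lo : Int)
    (t, t)
  else if hi ≤ lo then ([], [])
  else
    let mid := (lo + hi) / 2
    let l1r1 := pvHalves food lo mid
    let l2r2 := pvHalves food mid hi
    (l1r1.1 ++ l2r2.1, l2r2.2 ++ l1r1.2)
termination_by hi - lo
decreasing_by all_goals omega

def solution_alt (food : List Int) : String :=
  if food.length < 2 then "0"
  else
    let lr := pvHalves food 1 food.length
    String.ofList (lr.1 ++ ['0'] ++ lr.2)

-- ===== PRECONDITION & SPEC =====
def Spec_solution (food : List Int) (out : String) : Prop := out = solution_alt food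
instance (food : List Int) (out : String) : Decidable (Spec_solution food out) := by unfold Spec_solution; infer_instance

-- ===== CLAIM =====
def Claim_equal_solution : Prop := ∀ (food : List Int), Dom_solution food → Spec_solution food (solution food)

-- ===== LEMMAS AND PROOFS =====

theorem pv_join_nil_flatten (l : List (List Char)) : PySem.Chars.join [] l = l.flatten := by
  simp [PySem.Chars.join, List.intercalate]
  induction l with
  | nil => rfl
  | cons a t ih => cases t <;> simp_all

-- if amount = 0 the token is empty, so A's `continue` drops nothing from the joined string
theorem pv_tok_empty_of_amount_zero (food : List Int) (i : Int)
    (h : PySem.Int.floordiv (PySem.List.pyGetD food i 0) 2 = 0) : pvTok food i = [] := by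
  unfold pvTok
  rw [h]
  simp [PySem.List.pyRepeat]

-- A's loop, joined: the tokens of the reversed iteration list, then the accumulator, then the tokens
theorem pv_loop_join (food : List Int) (ds : List Int) (acc : List (List Char)) :
    (ds.foldl
      (fun acc i =>
        let amount := PySem.Int.floordiv (PySem.List.pyGetD food i 0) 2
        if amount = 0 then acc
        else
          let food_amount := PySem.List.pyRepeat (PySem.Int.toChars i) amount
          food_amount :: (acc ++ [food_amount]))
      acc).flatten
    = (ds.reverse.map (pvTok food)).flatten ++ acc.flatten ++ (ds.map (pvTok food)).flatten := by
  induction ds generalizing acc with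
  | nil => simp
  | cons d t ih =>
    simp only [List.foldl_cons, ih, List.reverse_cons, List.map_append, List.map_cons,
      List.flatten_append, List.map_nil, List.flatten_cons, List.flatten_nil]
    by_cases h : PySem.Int.floordiv (PySem.List.pyGetD food d 0) 2 = 0
    · rw [if_pos h]
      simp [pv_tok_empty_of_amount_zero food d h]
    · rw [if_neg h]
      simp [pvTok]

-- B's divide and conquer computes the forward and backward joins of the tokens of [lo, hi)
theorem pv_halves_eq (food : List Int) (lo hi : Nat) (h : lo < hi) :
    pvHalves food lo hi
    = (((PySem.List.pyRange (lo : Int) (hi : Int) 1).map (pvTok food)).flatten,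
       ((PySem.List.pyRange (lo : Int) (hi : Int) 1).map (pvTok food)).reverse.flatten) := by
  by_cases hb : hi - lo = 1
  · have hhi : hi = lo + 1 := by omega
    rw [pvHalves, if_pos hb]
    subst hhi
    push_cast
    rw [PySem.List.pyRange_one_singleton]
    simp
  · have hlt1 : lo < (lo + hi) / 2 := by omega
    have hlt2 : (lo + hi) / 2 < hi := by omega
    rw [pvHalves, if_neg hb, if_neg (by omega)]
    simp only []
    rw [pv_halves_eq food lo ((lo + hi) / 2) hlt1,
      pv_halves_eq food ((lo + hi) / 2) hi hlt2,
      PySem.List.pyRange_one_append (lo : Int) ((lo + hi) / 2 : Nat) (hi : Int)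
        (by exact_mod_cast Nat.le_of_lt hlt1) (by exact_mod_cast Nat.le_of_lt hlt2)]
    simp
termination_by hi - lo
decreasing_by all_goals omega

theorem solution_eq_alt (food : List Int) : solution food = solution_alt food := by
  unfold solution solution_alt
  have hrange : PySem.List.pyRange ((food.length : Int) - 1) 0 (-1)
      = (PySem.List.pyRange 1 (food.length : Int) 1).reverse := by
    rw [PySem.List.pyRange_neg_one_eq_reverse]
    norm_num
  by_cases hn : food.length < 2
  · rw [if_pos hn, hrange, PySem.List.pyRange_one_eq_nil (by exact_mod_cast Nat.lt_succ_iff.mp hn)]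
    simp [PySem.Chars.join, List.intercalate]
  · rw [if_neg hn, pv_halves_eq food 1 food.length (by omega)]
    simp only [hrange, pv_join_nil_flatten, pv_loop_join, List.reverse_reverse,
      Nat.cast_one, List.map_reverse, List.flatten_cons, List.flatten_nil, List.append_nil]

-- ===== VERDICT =====
theorem solution_spec : Claim_equal_solution := by
  intro food _
  exact solution_eq_alt food
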